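-- pv_equiv track=rewrite | github.com/laclustr/CSP | Problem Sets/CSP-Pset3/grant_vance_pset3.py | get_gy_kernel
-- ===== SOURCE A (Python) =====
-- def get_gy_kernel(img, row, col):
-- 	new_px = []
-- 	for rgb_idx in range(len(img[row][col])):
-- 		total = 0
-- 		if row > 0:
-- 			total += img[row - 1][col][rgb_idx] * -2
-- 		if row > 0 and col > 0:
-- 			total += img[row - 1][col - 1][rgb_idx] * -1
-- 		if row > 0 and col < len(img[0]) - 1:
-- 			total += img[row - 1][col + 1][rgb_idx] * -1
-- 		if row < len(img) - 1:
-- 			total += img[row + 1][col][rgb_idx] * 2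
-- 		if row < len(img) - 1 and col > 0:
-- 			total += img[row + 1][col - 1][rgb_idx] * 1
-- 		if row < len(img) - 1 and col < len(img[0]) - 1:
-- 			total += img[row + 1][col + 1][rgb_idx] * 1
-- 		new_px += [total]
-- 	return new_px
-- ===== SOURCE B (Python) =====
-- def get_gy_kernel(img, row, col):
--     n = len(img[row][col])
--     h, w = len(img), len(img[0])
--
--     def row_term(r):
--         # vector for one kernel row: 2*center (+ left if col>0) (+ right if col<w-1)
--         v = [2 * x for x in img[r][col][:n]]
--         if col > 0:
--             v = [a + b for a, b in zip(v, img[r][col - 1])]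
--         if col < w - 1:
--             v = [a + b for a, b in zip(v, img[r][col + 1])]
--         return v
--
--     above = row_term(row - 1) if row > 0 else [0] * n
--     below = row_term(row + 1) if row < h - 1 else [0] * n
--     return [b - a for a, b in zip(above, below)]
-- ===== Notes on version B (the rewrite author's own statement) =====
-- stated objective: alternative
-- what changed: Replaces A's per-channel scalar accumulation over six guarded branches by a staged vectorized computation: one whole-pixel contribution vector per kernel row (2*center + left + right built with zips) and a final elementwise subtraction below - above.
-- outside the precondition, e.g. on get_gy_kernel([[[], [2]], [[3]]], 0, 0): A returns [], B raises IndexError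
import Mathlib
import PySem

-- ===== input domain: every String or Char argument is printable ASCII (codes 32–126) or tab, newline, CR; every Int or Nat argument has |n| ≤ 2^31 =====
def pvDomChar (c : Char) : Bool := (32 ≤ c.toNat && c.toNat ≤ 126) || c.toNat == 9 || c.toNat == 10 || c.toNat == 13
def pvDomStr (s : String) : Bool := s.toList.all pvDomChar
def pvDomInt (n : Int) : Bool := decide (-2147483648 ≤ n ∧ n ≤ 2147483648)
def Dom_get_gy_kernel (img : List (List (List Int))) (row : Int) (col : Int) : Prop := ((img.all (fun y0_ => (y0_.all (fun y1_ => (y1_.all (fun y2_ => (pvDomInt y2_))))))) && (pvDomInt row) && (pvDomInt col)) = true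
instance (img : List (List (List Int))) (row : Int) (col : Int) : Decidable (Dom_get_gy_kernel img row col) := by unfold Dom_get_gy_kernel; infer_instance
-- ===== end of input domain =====

-- B replaces A's per-channel scalar accumulation over six branches by a staged, vectorized
-- computation: one whole-pixel contribution vector per kernel row (2*center + left + right,
-- built by zips), then an elementwise subtraction below - above (alternative decomposition).

-- shared Python-indexing helper: img[r][c] with Python index semantics; the [] default is
-- only reached outside Pre_get_gy_kernel, where Python raises IndexError.
def pvPixel (img : List (List (List Int))) (r c : Int) : List Int :=
  (PySem.List.pyGet? ((PySem.List.pyGet? img r).getD []) c).getD []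

-- img[r][c][i] for a Nat loop index i (A only; default unreachable inside Pre_)
def pvPx (img : List (List (List Int))) (r c : Int) (i : Nat) : Int :=
  (pvPixel img r c).getD i 0

-- ===== PORT A =====
def get_gy_kernel (img : List (List (List Int))) (row : Int) (col : Int) : List Int :=
  let n := (pvPixel img row col).length
  (List.range n).foldl (fun new_px rgb_idx =>
    let total : Int := 0
    let total := if row > 0 then total + pvPx img (row - 1) col rgb_idx * (-2) else total
    let total := if row > 0 ∧ col > 0 then total + pvPx img (row - 1) (col - 1) rgb_idx * (-1) else total
    let total := if row > 0 ∧ col < ((img.headD []).length : Int) - 1 then total + pvPx img (row - 1) (col + 1) rgb_idx * (-1) else total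
    let total := if row < (img.length : Int) - 1 then total + pvPx img (row + 1) col rgb_idx * 2 else total
    let total := if row < (img.length : Int) - 1 ∧ col > 0 then total + pvPx img (row + 1) (col - 1) rgb_idx * 1 else total
    let total := if row < (img.length : Int) - 1 ∧ col < ((img.headD []).length : Int) - 1 then total + pvPx img (row + 1) (col + 1) rgb_idx * 1 else total
    new_px ++ [total]) []

-- ===== PORT B =====
-- row_term(r): the vector 2*img[r][col][:n] (+ img[r][col-1] if col>0) (+ img[r][col+1] if col<w-1)
def pvRowTerm (img : List (List (List Int))) (col : Int) (n : Nat) (w : Int) (r : Int) : List Int :=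
  let v := (PySem.List.slice (pvPixel img r col) none (some (n : Int))).map (fun x => 2 * x)
  let v := if col > 0 then List.zipWith (· + ·) v (pvPixel img r (col - 1)) else v
  let v := if col < w - 1 then List.zipWith (· + ·) v (pvPixel img r (col + 1)) else v
  v

def get_gy_kernel_alt (img : List (List (List Int))) (row : Int) (col : Int) : List Int :=
  let n := (pvPixel img row col).length
  let h : Int := img.length
  let w : Int := (img.headD []).length
  let above := if row > 0 then pvRowTerm img col n w (row - 1) else List.replicate n 0
  let below := if row < h - 1 then pvRowTerm img col n w (row + 1) else List.replicate n 0
  List.zipWith (fun a b => b - a) above below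

-- ===== PRECONDITION & SPEC =====
-- pvAccOK img r c n: img[r][c][i] succeeds in Python for every i < n
def pvAccOK (img : List (List (List Int))) (r c : Int) (n : Nat) : Bool :=
  match PySem.List.pyGet? img r with
  | none => false
  | some l =>
    match PySem.List.pyGet? l c with
    | none => false
    | some p => n ≤ p.length

-- Pre_ excludes (besides the inputs where A raises IndexError) the degenerate ragged images
-- where the centre pixel has 0 channels but a guarded neighbour pixel is missing: A returns []
-- there without touching neighbours, while B's vectorized algorithm fetches the neighbour
-- pixels and raises IndexError.
def Pre_get_gy_kernel (img : List (List (List Int))) (row : Int) (col : Int) : Prop :=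
  (match PySem.List.pyGet? img row with
   | none => false
   | some rrow =>
     match PySem.List.pyGet? rrow col with
     | none => false
     | some px =>
       let n := px.length
       let h : Int := img.length
       let w : Int := (img.headD []).length
       ((!(decide (row > 0)) || pvAccOK img (row - 1) col n) &&
        (!(decide (row > 0) && decide (col > 0)) || pvAccOK img (row - 1) (col - 1) n) &&
        (!(decide (row > 0) && decide (col < w - 1)) || pvAccOK img (row - 1) (col + 1) n) &&
        (!(decide (row < h - 1)) || pvAccOK img (row + 1) col n) &&
        (!(decide (row < h - 1) && decide (col > 0)) || pvAccOK img (row + 1) (col - 1) n) &&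
        (!(decide (row < h - 1) && decide (col < w - 1)) || pvAccOK img (row + 1) (col + 1) n))) = true
instance (img : List (List (List Int))) (row : Int) (col : Int) : Decidable (Pre_get_gy_kernel img row col) := by unfold Pre_get_gy_kernel; infer_instance

def pvWitness_get_gy_kernel : List (List (List Int)) × Int × Int := ([[[1], [2]], [[3], [4]]], 0, 0)

def Spec_get_gy_kernel (img : List (List (List Int))) (row : Int) (col : Int) (out : List Int) : Prop := out = get_gy_kernel_alt img row col
instance (img : List (List (List Int))) (row : Int) (col : Int) (out : List Int) : Decidable (Spec_get_gy_kernel img row col out) := by unfold Spec_get_gy_kernel; infer_instance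

-- ===== CLAIM =====
def Claim_equal_get_gy_kernel : Prop := ∀ (img : List (List (List Int))) (row : Int) (col : Int), Dom_get_gy_kernel img row col → Pre_get_gy_kernel img row col → Spec_get_gy_kernel img row col (get_gy_kernel img row col)

-- ===== LEMMAS AND PROOFS =====

theorem pvAccOK_length {img : List (List (List Int))} {r c : Int} {n : Nat}
    (h : pvAccOK img r c n = true) : n ≤ (pvPixel img r c).length := by
  unfold pvAccOK at h
  unfold pvPixel
  cases h1 : PySem.List.pyGet? img r with
  | none => simp [h1] at h
  | some l =>
    rw [h1] at h
    simp only [Option.getD_some] at h ⊢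
    cases h2 : PySem.List.pyGet? l c with
    | none => simp [h2] at h
    | some p =>
      rw [h2] at h
      simp only [Option.getD_some]
      exact of_decide_eq_true h

theorem pvRowTerm_length {img : List (List (List Int))} {col : Int} {n : Nat} {w : Int} {r : Int}
    (hc : n ≤ (pvPixel img r col).length)
    (hl : col > 0 → n ≤ (pvPixel img r (col - 1)).length)
    (hr : col < w - 1 → n ≤ (pvPixel img r (col + 1)).length) :
    (pvRowTerm img col n w r).length = n := by
  unfold pvRowTerm
  rw [PySem.List.slice_to_natCast]
  split_ifs with h1 h2 h2 <;>
    simp [List.length_zipWith, List.length_take] <;> omega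

theorem pvRowTerm_getElem {img : List (List (List Int))} {col : Int} {n : Nat} {w : Int} {r : Int}
    (hc : n ≤ (pvPixel img r col).length)
    (hl : col > 0 → n ≤ (pvPixel img r (col - 1)).length)
    (hr : col < w - 1 → n ≤ (pvPixel img r (col + 1)).length)
    (i : Nat) (hi : i < n) :
    (pvRowTerm img col n w r).getD i 0 =
      2 * pvPx img r col i +
      (if col > 0 then pvPx img r (col - 1) i else 0) +
      (if col < w - 1 then pvPx img r (col + 1) i else 0) := by
  unfold pvRowTerm pvPx
  rw [PySem.List.slice_to_natCast]
  have h0 : i < (pvPixel img r col).length := lt_of_lt_of_le hi hc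
  have hll : col > 0 → i < (pvPixel img r (col - 1)).length :=
    fun h => lt_of_lt_of_le hi (hl h)
  have hrr : col < w - 1 → i < (pvPixel img r (col + 1)).length :=
    fun h => lt_of_lt_of_le hi (hr h)
  split_ifs with h1 h2 h2
  · simp [List.length_zipWith, List.length_take, h0, hi, hll h1, hrr h2]
  · simp [List.length_zipWith, List.length_take, h0, hi, hll h1]
  · simp [List.length_zipWith, List.length_take, h0, hi, hrr h2]
  · simp [List.length_take, h0, hi]

theorem pv_foldl_append_map (f : Nat → Int) (l : List Nat) (acc : List Int) :
    l.foldl (fun a i => a ++ [f i]) acc = acc ++ l.map f := by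
  induction l generalizing acc with
  | nil => simp
  | cons x xs ih => simp [List.foldl, ih]

set_option maxHeartbeats 1000000 in
theorem pv_main (img : List (List (List Int))) (row col : Int)
    (hpre : Pre_get_gy_kernel img row col) :
    get_gy_kernel img row col = get_gy_kernel_alt img row col := by
  unfold Pre_get_gy_kernel at hpre
  cases h1 : PySem.List.pyGet? img row with
  | none => rw [h1] at hpre; simp at hpre
  | some rrow =>
    rw [h1] at hpre
    dsimp only at hpre
    cases h2 : PySem.List.pyGet? rrow col with
    | none => rw [h2] at hpre; simp at hpre
    | some px =>
      rw [h2] at hpre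
      dsimp only at hpre
      simp only [Bool.and_eq_true, Bool.or_eq_true, Bool.not_eq_true',
        Bool.and_eq_false_iff, decide_eq_false_iff_not] at hpre
      obtain ⟨⟨⟨⟨⟨c1, c2⟩, c3⟩, c4⟩, c5⟩, c6⟩ := hpre
      have hpx : pvPixel img row col = px := by simp [pvPixel, h1, h2]
      have a1 : row > 0 → px.length ≤ (pvPixel img (row - 1) col).length :=
        fun h => pvAccOK_length (c1.resolve_left (not_not_intro h))
      have a2 : row > 0 → col > 0 → px.length ≤ (pvPixel img (row - 1) (col - 1)).length :=
        fun ha hb => pvAccOK_length (c2.resolve_left (fun hc => hc.elim (fun h => h ha) (fun h => h hb)))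
      have a3 : row > 0 → col < ((img.headD []).length : Int) - 1 → px.length ≤ (pvPixel img (row - 1) (col + 1)).length :=
        fun ha hb => pvAccOK_length (c3.resolve_left (fun hc => hc.elim (fun h => h ha) (fun h => h hb)))
      have a4 : row < (img.length : Int) - 1 → px.length ≤ (pvPixel img (row + 1) col).length :=
        fun h => pvAccOK_length (c4.resolve_left (not_not_intro h))
      have a5 : row < (img.length : Int) - 1 → col > 0 → px.length ≤ (pvPixel img (row + 1) (col - 1)).length :=
        fun ha hb => pvAccOK_length (c5.resolve_left (fun hc => hc.elim (fun h => h ha) (fun h => h hb)))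
      have a6 : row < (img.length : Int) - 1 → col < ((img.headD []).length : Int) - 1 → px.length ≤ (pvPixel img (row + 1) (col + 1)).length :=
        fun ha hb => pvAccOK_length (c6.resolve_left (fun hc => hc.elim (fun h => h ha) (fun h => h hb)))
      have hA_len : (if row > 0 then pvRowTerm img col px.length ((img.headD []).length : Int) (row - 1) else List.replicate px.length (0 : Int)).length = px.length := by
        by_cases hr : row > 0
        · rw [if_pos hr]; exact pvRowTerm_length (a1 hr) (a2 hr) (a3 hr)
        · rw [if_neg hr]; simp
      have hB_len : (if row < (img.length : Int) - 1 then pvRowTerm img col px.length ((img.headD []).length : Int) (row + 1) else List.replicate px.length (0 : Int)).length = px.length := by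
        by_cases hr : row < (img.length : Int) - 1
        · rw [if_pos hr]; exact pvRowTerm_length (a4 hr) (a5 hr) (a6 hr)
        · rw [if_neg hr]; simp
      unfold get_gy_kernel get_gy_kernel_alt
      rw [pv_foldl_append_map]
      simp only [List.nil_append, hpx]
      apply List.ext_getElem
      · simp only [List.length_map, List.length_range, List.length_zipWith,
          hA_len, hB_len, Nat.min_self]
      · intro i hi1 hi2
        have hi : i < px.length := by simpa using hi1
        have haA : i < (if row > 0 then pvRowTerm img col px.length ((img.headD []).length : Int) (row - 1) else List.replicate px.length (0 : Int)).length := by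
          rw [hA_len]; exact hi
        have haB : i < (if row < (img.length : Int) - 1 then pvRowTerm img col px.length ((img.headD []).length : Int) (row + 1) else List.replicate px.length (0 : Int)).length := by
          rw [hB_len]; exact hi
        simp only [List.getElem_map, List.getElem_range, List.getElem_zipWith]
        rw [← List.getD_eq_getElem _ 0 haA, ← List.getD_eq_getElem _ 0 haB]
        by_cases hr0 : row > 0 <;> by_cases hrb : row < (img.length : Int) - 1
        · conv_rhs => rw [if_pos hr0, if_pos hrb]
          rw [pvRowTerm_getElem (a1 hr0) (a2 hr0) (a3 hr0) i hi,
              pvRowTerm_getElem (a4 hrb) (a5 hrb) (a6 hrb) i hi]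
          split_ifs <;> (first | ring1 | omega)
        · conv_rhs => rw [if_pos hr0, if_neg hrb]
          rw [pvRowTerm_getElem (a1 hr0) (a2 hr0) (a3 hr0) i hi, List.getD_replicate]
          split_ifs <;> (first | ring1 | omega)
          all_goals exact hi
        · conv_rhs => rw [if_neg hr0, if_pos hrb]
          rw [List.getD_replicate,
              pvRowTerm_getElem (a4 hrb) (a5 hrb) (a6 hrb) i hi]
          split_ifs <;> (first | ring1 | omega)
          all_goals exact hi
        · conv_rhs => rw [if_neg hr0, if_neg hrb]
          rw [List.getD_replicate]
          split_ifs <;> (first | ring1 | omega)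
          all_goals exact hi

-- ===== VERDICT =====
theorem get_gy_kernel_spec : Claim_equal_get_gy_kernel := by
  intro img row col _ hpre
  unfold Spec_get_gy_kernel
  exact pv_main img row col hpre
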